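-- pv_equiv track=rewrite | github.com/vermarajat22255/CS-559 | SSW-810/HW07_Rajat_Verma.py | web_analyzer
-- ===== SOURCE A (Python) =====
-- from collections import defaultdict, Counter
-- from typing import Any, DefaultDict, Optional, List, Set, Tuple
--
-- def web_analyzer(
--         weblogs: List[Tuple[str, str]]) -> List[Tuple[str, List[str]]]:
--     """ web analyzer for web logs. dicussed with Sanam Jena"""
--
--     if not isinstance(
--             weblogs,
--             List):  # If the input is not of type 'List', raise ValueError
--         raise ValueError("Input weblogs must be of type List")
--     dd: DefaultDict[str, set[str]] = defaultdict(set)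
--     for names, webpage in weblogs:
--         dd[webpage].add(names)
--     return [(website, sorted(name))
--             for website, name in sorted(dd.items())]
-- ===== SOURCE B (Python) =====
-- from typing import List, Tuple
--
--
-- def web_analyzer(
--         weblogs: List[Tuple[str, str]]) -> List[Tuple[str, List[str]]]:
--     """Group names by webpage: no dict, just sorted distinct pages and a
--     per-page comprehension over the input."""
--     if not isinstance(
--             weblogs,
--             List):  # If the input is not of type 'List', raise ValueError
--         raise ValueError("Input weblogs must be of type List")
--     pages = sorted({webpage for _, webpage in weblogs})
--     return [(page, sorted({name for name, webpage in weblogs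
--                            if webpage == page}))
--             for page in pages]
-- ===== Notes on version B (the rewrite author's own statement) =====
-- stated objective: simpler
-- what changed: Replaces the defaultdict-of-sets accumulation and items sort by two set comprehensions: sort the distinct webpages once, then collect each page's distinct names with a direct scan per page.
import Mathlib
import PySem

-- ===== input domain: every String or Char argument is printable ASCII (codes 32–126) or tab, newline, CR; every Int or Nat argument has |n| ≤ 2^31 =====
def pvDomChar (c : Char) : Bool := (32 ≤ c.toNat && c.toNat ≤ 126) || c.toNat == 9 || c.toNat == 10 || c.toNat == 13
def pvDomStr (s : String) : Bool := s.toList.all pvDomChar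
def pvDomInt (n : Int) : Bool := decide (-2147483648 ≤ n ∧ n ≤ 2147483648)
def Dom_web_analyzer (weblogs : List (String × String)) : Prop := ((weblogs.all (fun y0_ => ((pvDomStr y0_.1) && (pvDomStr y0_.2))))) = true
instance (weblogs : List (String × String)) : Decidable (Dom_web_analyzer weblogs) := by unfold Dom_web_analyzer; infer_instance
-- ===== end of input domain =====

-- B replaces A's defaultdict(set) accumulation by sorting the distinct webpages once and
-- collecting each page's distinct names with a per-page comprehension (objective: simpler).


-- ===== PORT A =====
-- dd: DefaultDict[str, set[str]]; dd[webpage].add(names) is modify with default empty set.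
-- sorted(dd.items()) compares (str, set) tuples; dict keys are distinct so the comparison is
-- decided by the first component — ported as a sort keyed on the key.
def web_analyzer (weblogs : List (String × String)) : List (String × List String) :=
  let dd : PySem.Dict String (PySem.Set String) :=
    weblogs.foldl (fun d p => d.modify p.2 PySem.Set.empty (fun s => s.add p.1)) PySem.Dict.empty
  (PySem.List.sorted dd.items (fun it => it.1)).map
    (fun it => (it.1, PySem.List.sorted it.2 (fun x => x)))

-- ===== PORT B =====
-- pages = sorted({webpage for _, webpage in weblogs}); per page a set comprehension, sorted.
def web_analyzer_alt (weblogs : List (String × String)) : List (String × List String) :=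
  let pages := PySem.List.sorted (PySem.Set.ofList (weblogs.map (fun p => p.2))) (fun x => x)
  pages.map (fun page =>
    (page, PySem.List.sorted
             (PySem.Set.ofList ((weblogs.filter (fun p => p.2 == page)).map (fun p => p.1)))
             (fun x => x)))

-- ===== PRECONDITION & SPEC =====
def Spec_web_analyzer (weblogs : List (String × String)) (out : List (String × List String)) : Prop := out = web_analyzer_alt weblogs
instance (weblogs : List (String × String)) (out : List (String × List String)) : Decidable (Spec_web_analyzer weblogs out) := by unfold Spec_web_analyzer; infer_instance

-- ===== CLAIM (what is proved, stated in full; the proofs are below) =====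
def Claim_equal_web_analyzer : Prop := ∀ (weblogs : List (String × String)), Dom_web_analyzer weblogs → Spec_web_analyzer weblogs (web_analyzer weblogs)

-- ===== LEMMAS AND PROOFS =====

-- The accumulated dict's entry for page w is exactly the set of names seen with page w.
theorem pv_getD_loop (l : List (String × String)) (d : PySem.Dict String (PySem.Set String)) (w : String) :
    (l.foldl (fun d p => d.modify p.2 PySem.Set.empty (fun s => s.add p.1)) d).getD w PySem.Set.empty
      = PySem.Set.update (d.getD w PySem.Set.empty) ((l.filter (fun p => p.2 == w)).map (fun p => p.1)) := by
  induction l generalizing d with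
  | nil => rfl
  | cons p l ih =>
    simp only [List.foldl_cons]
    by_cases h : p.2 = w
    · subst h
      rw [List.filter_cons_of_pos (by simp), List.map_cons, PySem.Set.update_cons, ih,
          PySem.Dict.getD_modify_self]
    · rw [List.filter_cons_of_neg (by simp [h]), ih,
          PySem.Dict.getD_modify_of_ne _ _ _ (Ne.symm h)]

theorem pv_equal : ∀ (weblogs : List (String × String)),
    web_analyzer weblogs = web_analyzer_alt weblogs := by
  intro weblogs
  unfold web_analyzer web_analyzer_alt
  dsimp only
  set step := fun (d : PySem.Dict String (PySem.Set String)) (p : String × String) =>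
    d.modify p.2 PySem.Set.empty (fun s => s.add p.1) with hstep
  set dd := weblogs.foldl step PySem.Dict.empty with hdd
  have hkeys : dd.keys = PySem.Set.ofList (weblogs.map (fun p => p.2)) := by
    rw [hdd, hstep]
    rw [PySem.Dict.keys_foldl_modify_key weblogs (fun p => p.2) PySem.Set.empty
          (fun _ p => fun s => s.add p.1) PySem.Dict.empty]
    simpa using PySem.Set.update_nil_left (weblogs.map (fun p => p.2))
  have hnodup : dd.keys.Nodup := by
    rw [hkeys]; exact PySem.Set.nodup_ofList _
  -- name the sorted key list
  set ks := PySem.List.sorted (PySem.Set.ofList (weblogs.map (fun p => p.2))) (fun x => x) with hks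
  have hgetD : ∀ w, dd.getD w PySem.Set.empty
      = PySem.Set.ofList ((weblogs.filter (fun p => p.2 == w)).map (fun p => p.1)) := by
    intro w
    rw [hdd, hstep, pv_getD_loop]
    simp [PySem.Dict.getD_empty, PySem.Set.update_nil_left]
  -- the sorted items list is the map of the sorted keys
  have hitems : dd.items = dd.keys.map (fun k => (k, dd.getD k PySem.Set.empty)) :=
    PySem.Dict.items_eq_map_keys dd hnodup PySem.Set.empty
  have hsorted : PySem.List.sorted dd.items (fun it => it.1)
      = ks.map (fun k => (k, dd.getD k PySem.Set.empty)) := by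
    apply PySem.List.sorted_eq_of_perm_of_pairwise_lt
    · rw [hitems, hkeys]
      exact List.Perm.map _ (by rw [hks]; exact PySem.List.sorted_perm _ _ _)
    · have hlt : ks.Pairwise (· < ·) := by
        rw [hks]; exact PySem.List.sorted_ofList_pairwise_lt _
      exact (List.pairwise_map).2 (by simpa using hlt)
  rw [hsorted, List.map_map]
  apply List.map_congr_left
  intro k _
  simp only [Function.comp]
  rw [hgetD k]

-- ===== VERDICT (by name: the statement is the Claim_ definition above) =====
theorem web_analyzer_spec : Claim_equal_web_analyzer := by
  intro weblogs _
  unfold Spec_web_analyzer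
  exact pv_equal weblogs
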